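-- pv_equiv track=rewrite | github.com/Sosbx/PLanning | core/Analyzer/pre_analyzer.py | calculate_cat_group_count
-- ===== SOURCE A (Python) =====
-- from typing import List, Dict, Tuple
--
-- def calculate_cat_group_count(group: str, cat_posts: Dict) -> int:
--     """Calcule le nombre de postes CAT pour un groupe donné"""
--     total = 0
--
--     # Définition des mappings de postes pour chaque groupe
--     group_mappings = {
--         # Groupes Weekend (uniquement samedi et dimanche/férié)
--         "CmS": ["CM", "HM","SM", "RM", "MM"],  # Uniquement samedi
--         "CmD": ["CM", "HM", "SM", "RM"],  # Uniquement dimanche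
--         "CaSD": ["CA", "HA", "SA", "RA"],  # Samedi + Dimanche
--         "CsSD": ["CS", "HS", "SS", "RS"],  # Samedi + Dimanche
--         "VmS": ["ML","MC"],  # Uniquement samedi
--         "VmD": ["ML", "MC"],  # Uniquement dimanche
--         "VaSD": ["AL", "AC"],  # Samedi + Dimanche
--         "NAMw": ["NM", "NA", "NC"],  # Samedi + Dimanche
--         "NLw": ["NL"],  # NLw = NLs + NLd + NLv
--
--         # Groupes Semaine (uniquement weekday)
--         "XmM": ["MM", "SM", "RM"],
--         "XM": ["CM", "HM"],
--         "XA": ["CA", "HA", "SA","RA","CT"],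
--         "XS": ["CS", "HS", "SS", "RS"],
--         "NMC": ["NM", "NC","NA"],
--         "Vm": ["ML", "MC"],
--         "NL": ["NL"],
--         "NLv": ["NL"]
--     }
--
--     if group in group_mappings:
--         if group == "NLw":
--             # NLs + NLd + NLv
--             total = (
--                 cat_posts["saturday"].get("NL", 0) +          # NLs
--                 cat_posts["sunday_holiday"].get("NL", 0) +    # NLd
--                 cat_posts["weekday"].get("NLv", 0)           # NLv
--             )
--         elif group in ["CmS", "VmS"]:
--             # Groupes uniquement samedi
--             for post_type in group_mappings[group]:
--                 total += cat_posts["saturday"].get(post_type, 0)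
--         elif group in ["CmD", "VmD"]:
--             # Groupes uniquement dimanche
--             for post_type in group_mappings[group]:
--                 total += cat_posts["sunday_holiday"].get(post_type, 0)
--         elif group in ["CaSD", "CsSD", "VaSD", "NAMw"]:
--             # Groupes samedi + dimanche
--             for post_type in group_mappings[group]:
--                 total += (cat_posts["saturday"].get(post_type, 0) +
--                         cat_posts["sunday_holiday"].get(post_type, 0))
--         else:
--             # Groupes semaine (uniquement weekday)
--             for post_type in group_mappings[group]:
--                 total += cat_posts["weekday"].get(post_type, 0)
--
--     return total
-- ===== SOURCE B (Python) =====
-- # Flat table: each group maps directly to (day_key, post_type) pairs; one uniform loop replaces the branch cascade.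
-- _SAT = "saturday"
-- _SUN = "sunday_holiday"
-- _WD = "weekday"
--
-- FLAT_GROUPS = {
--     "CmS":  [(_SAT, p) for p in ["CM", "HM", "SM", "RM", "MM"]],
--     "CmD":  [(_SUN, p) for p in ["CM", "HM", "SM", "RM"]],
--     "CaSD": [(d, p) for p in ["CA", "HA", "SA", "RA"] for d in (_SAT, _SUN)],
--     "CsSD": [(d, p) for p in ["CS", "HS", "SS", "RS"] for d in (_SAT, _SUN)],
--     "VmS":  [(_SAT, p) for p in ["ML", "MC"]],
--     "VmD":  [(_SUN, p) for p in ["ML", "MC"]],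
--     "VaSD": [(d, p) for p in ["AL", "AC"] for d in (_SAT, _SUN)],
--     "NAMw": [(d, p) for p in ["NM", "NA", "NC"] for d in (_SAT, _SUN)],
--     "NLw":  [(_SAT, "NL"), (_SUN, "NL"), (_WD, "NLv")],
--     "XmM":  [(_WD, p) for p in ["MM", "SM", "RM"]],
--     "XM":   [(_WD, p) for p in ["CM", "HM"]],
--     "XA":   [(_WD, p) for p in ["CA", "HA", "SA", "RA", "CT"]],
--     "XS":   [(_WD, p) for p in ["CS", "HS", "SS", "RS"]],
--     "NMC":  [(_WD, p) for p in ["NM", "NC", "NA"]],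
--     "Vm":   [(_WD, p) for p in ["ML", "MC"]],
--     "NL":   [(_WD, "NL")],
--     "NLv":  [(_WD, "NL")],
-- }
--
-- def calculate_cat_group_count(group: str, cat_posts) -> int:
--     pairs = FLAT_GROUPS.get(group)
--     if pairs is None:
--         return 0
--     return sum(cat_posts[day].get(post, 0) for day, post in pairs)
-- ===== Notes on version B (the rewrite author's own statement) =====
-- stated objective: simpler
-- what changed: Replaces the post-list table plus the five-way day-selection branch cascade with one flat table mapping each group to explicit (day, post) pairs, summed by a single uniform loop.
import Mathlib
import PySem

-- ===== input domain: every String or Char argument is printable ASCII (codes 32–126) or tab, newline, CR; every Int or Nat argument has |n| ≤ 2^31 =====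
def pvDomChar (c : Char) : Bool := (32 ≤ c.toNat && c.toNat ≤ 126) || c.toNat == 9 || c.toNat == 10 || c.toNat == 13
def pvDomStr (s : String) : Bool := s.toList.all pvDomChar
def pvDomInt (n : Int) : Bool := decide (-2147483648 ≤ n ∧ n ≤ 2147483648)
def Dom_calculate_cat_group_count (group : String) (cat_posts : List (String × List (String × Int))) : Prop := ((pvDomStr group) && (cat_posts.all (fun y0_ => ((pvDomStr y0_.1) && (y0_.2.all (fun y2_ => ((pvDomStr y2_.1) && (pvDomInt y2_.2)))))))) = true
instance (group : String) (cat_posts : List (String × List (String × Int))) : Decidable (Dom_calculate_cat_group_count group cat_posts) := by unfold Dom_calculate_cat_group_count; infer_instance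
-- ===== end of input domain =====

-- B replaces A's post-list table + day-branch cascade by one flat (day, post)-pair table and a single loop; equivalence of return values.

-- ===== PORT A =====
-- cat_posts[day] (KeyError if absent; Pre_ excludes that) followed by .get(post, 0)
def aGet (cat_posts : List (String × List (String × Int))) (day post : String) : Int :=
  PySem.Dict.getD (PySem.Dict.mk (((PySem.Dict.mk cat_posts).get? day).getD [])) post 0

def group_mappings : PySem.Dict String (List String) := PySem.Dict.mk [
  ("CmS", ["CM", "HM", "SM", "RM", "MM"]),
  ("CmD", ["CM", "HM", "SM", "RM"]),
  ("CaSD", ["CA", "HA", "SA", "RA"]),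
  ("CsSD", ["CS", "HS", "SS", "RS"]),
  ("VmS", ["ML", "MC"]),
  ("VmD", ["ML", "MC"]),
  ("VaSD", ["AL", "AC"]),
  ("NAMw", ["NM", "NA", "NC"]),
  ("NLw", ["NL"]),
  ("XmM", ["MM", "SM", "RM"]),
  ("XM", ["CM", "HM"]),
  ("XA", ["CA", "HA", "SA", "RA", "CT"]),
  ("XS", ["CS", "HS", "SS", "RS"]),
  ("NMC", ["NM", "NC", "NA"]),
  ("Vm", ["ML", "MC"]),
  ("NL", ["NL"]),
  ("NLv", ["NL"])]

def calculate_cat_group_count (group : String) (cat_posts : List (String × List (String × Int))) : Int :=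
  if group_mappings.contains group then
    if group == "NLw" then
      aGet cat_posts "saturday" "NL" + aGet cat_posts "sunday_holiday" "NL" +
        aGet cat_posts "weekday" "NLv"
    else if (["CmS", "VmS"] : List String).contains group then
      (group_mappings.getD group []).foldl (fun t p => t + aGet cat_posts "saturday" p) 0
    else if (["CmD", "VmD"] : List String).contains group then
      (group_mappings.getD group []).foldl (fun t p => t + aGet cat_posts "sunday_holiday" p) 0
    else if (["CaSD", "CsSD", "VaSD", "NAMw"] : List String).contains group then
      (group_mappings.getD group []).foldl
        (fun t p => t + (aGet cat_posts "saturday" p + aGet cat_posts "sunday_holiday" p)) 0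
    else
      (group_mappings.getD group []).foldl (fun t p => t + aGet cat_posts "weekday" p) 0
  else 0

-- ===== PORT B =====
def bGet (cat_posts : List (String × List (String × Int))) (day post : String) : Int :=
  PySem.Dict.getD (PySem.Dict.mk (((PySem.Dict.mk cat_posts).get? day).getD [])) post 0

def flat_groups : PySem.Dict String (List (String × String)) := PySem.Dict.mk [
  ("CmS", ["CM", "HM", "SM", "RM", "MM"].map (fun p => ("saturday", p))),
  ("CmD", ["CM", "HM", "SM", "RM"].map (fun p => ("sunday_holiday", p))),
  ("CaSD", ["CA", "HA", "SA", "RA"].flatMap (fun p => [("saturday", p), ("sunday_holiday", p)])),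
  ("CsSD", ["CS", "HS", "SS", "RS"].flatMap (fun p => [("saturday", p), ("sunday_holiday", p)])),
  ("VmS", ["ML", "MC"].map (fun p => ("saturday", p))),
  ("VmD", ["ML", "MC"].map (fun p => ("sunday_holiday", p))),
  ("VaSD", ["AL", "AC"].flatMap (fun p => [("saturday", p), ("sunday_holiday", p)])),
  ("NAMw", ["NM", "NA", "NC"].flatMap (fun p => [("saturday", p), ("sunday_holiday", p)])),
  ("NLw", [("saturday", "NL"), ("sunday_holiday", "NL"), ("weekday", "NLv")]),
  ("XmM", ["MM", "SM", "RM"].map (fun p => ("weekday", p))),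
  ("XM", ["CM", "HM"].map (fun p => ("weekday", p))),
  ("XA", ["CA", "HA", "SA", "RA", "CT"].map (fun p => ("weekday", p))),
  ("XS", ["CS", "HS", "SS", "RS"].map (fun p => ("weekday", p))),
  ("NMC", ["NM", "NC", "NA"].map (fun p => ("weekday", p))),
  ("Vm", ["ML", "MC"].map (fun p => ("weekday", p))),
  ("NL", [("weekday", "NL")]),
  ("NLv", [("weekday", "NL")])]

def calculate_cat_group_count_alt (group : String) (cat_posts : List (String × List (String × Int))) : Int :=
  match flat_groups.get? group with
  | none => 0
  | some pairs => pairs.foldl (fun t dp => t + bGet cat_posts dp.1 dp.2) 0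

-- ===== PRECONDITION & SPEC =====
-- the day keys A accesses for a given group (closed-form table, independent of the ports)
def pvDaysNeeded (group : String) : List String :=
  if group = "NLw" then ["saturday", "sunday_holiday", "weekday"]
  else if group = "CmS" ∨ group = "VmS" then ["saturday"]
  else if group = "CmD" ∨ group = "VmD" then ["sunday_holiday"]
  else if group = "CaSD" ∨ group = "CsSD" ∨ group = "VaSD" ∨ group = "NAMw" then
    ["saturday", "sunday_holiday"]
  else if group = "XmM" ∨ group = "XM" ∨ group = "XA" ∨ group = "XS" ∨ group = "NMC" ∨
      group = "Vm" ∨ group = "NL" ∨ group = "NLv" then ["weekday"]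
  else []

-- Pre_ excludes exactly the inputs where Python A raises KeyError: a known group whose needed day key is missing from cat_posts.
def Pre_calculate_cat_group_count (group : String) (cat_posts : List (String × List (String × Int))) : Prop :=
  ∀ d ∈ pvDaysNeeded group, d ∈ cat_posts.map Prod.fst
instance (group : String) (cat_posts : List (String × List (String × Int))) : Decidable (Pre_calculate_cat_group_count group cat_posts) := by unfold Pre_calculate_cat_group_count; infer_instance

def pvWitness_calculate_cat_group_count : String × (List (String × List (String × Int))) :=
  ("NLw", [("saturday", [("NL", 3)]), ("sunday_holiday", []), ("weekday", [("NLv", 1)])])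

def Spec_calculate_cat_group_count (group : String) (cat_posts : List (String × List (String × Int))) (out : Int) : Prop := out = calculate_cat_group_count_alt group cat_posts
instance (group : String) (cat_posts : List (String × List (String × Int))) (out : Int) : Decidable (Spec_calculate_cat_group_count group cat_posts out) := by unfold Spec_calculate_cat_group_count; infer_instance

-- ===== CLAIM (what is proved, stated in full; the proofs are below) =====
def Claim_equal_calculate_cat_group_count : Prop := ∀ (group : String) (cat_posts : List (String × List (String × Int))), Dom_calculate_cat_group_count group cat_posts → Pre_calculate_cat_group_count group cat_posts → Spec_calculate_cat_group_count group cat_posts (calculate_cat_group_count group cat_posts)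

-- ===== LEMMAS AND PROOFS =====

-- ===== VERDICT (by name: the statement is the Claim_ definition above) =====
theorem calculate_cat_group_count_spec : Claim_equal_calculate_cat_group_count := by
  intro g cp _ _
  unfold Spec_calculate_cat_group_count
  by_cases h1 : g = "CmS"
  · subst h1; simp [calculate_cat_group_count, calculate_cat_group_count_alt, group_mappings, flat_groups, aGet, bGet, List.foldl, PySem.Dict.contains_mk, PySem.Dict.get?_mk_cons, PySem.Dict.getD_eq_get?_getD]
  by_cases h2 : g = "CmD"
  · subst h2; simp [calculate_cat_group_count, calculate_cat_group_count_alt, group_mappings, flat_groups, aGet, bGet, List.foldl, PySem.Dict.contains_mk, PySem.Dict.get?_mk_cons, PySem.Dict.getD_eq_get?_getD]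
  by_cases h3 : g = "CaSD"
  · subst h3; simp [calculate_cat_group_count, calculate_cat_group_count_alt, group_mappings, flat_groups, aGet, bGet, List.foldl, PySem.Dict.contains_mk, PySem.Dict.get?_mk_cons, PySem.Dict.getD_eq_get?_getD]; ring
  by_cases h4 : g = "CsSD"
  · subst h4; simp [calculate_cat_group_count, calculate_cat_group_count_alt, group_mappings, flat_groups, aGet, bGet, List.foldl, PySem.Dict.contains_mk, PySem.Dict.get?_mk_cons, PySem.Dict.getD_eq_get?_getD]; ring
  by_cases h5 : g = "VmS"
  · subst h5; simp [calculate_cat_group_count, calculate_cat_group_count_alt, group_mappings, flat_groups, aGet, bGet, List.foldl, PySem.Dict.contains_mk, PySem.Dict.get?_mk_cons, PySem.Dict.getD_eq_get?_getD]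
  by_cases h6 : g = "VmD"
  · subst h6; simp [calculate_cat_group_count, calculate_cat_group_count_alt, group_mappings, flat_groups, aGet, bGet, List.foldl, PySem.Dict.contains_mk, PySem.Dict.get?_mk_cons, PySem.Dict.getD_eq_get?_getD]
  by_cases h7 : g = "VaSD"
  · subst h7; simp [calculate_cat_group_count, calculate_cat_group_count_alt, group_mappings, flat_groups, aGet, bGet, List.foldl, PySem.Dict.contains_mk, PySem.Dict.get?_mk_cons, PySem.Dict.getD_eq_get?_getD]; ring
  by_cases h8 : g = "NAMw"
  · subst h8; simp [calculate_cat_group_count, calculate_cat_group_count_alt, group_mappings, flat_groups, aGet, bGet, List.foldl, PySem.Dict.contains_mk, PySem.Dict.get?_mk_cons, PySem.Dict.getD_eq_get?_getD]; ring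
  by_cases h9 : g = "NLw"
  · subst h9; simp [calculate_cat_group_count, calculate_cat_group_count_alt, group_mappings, flat_groups, aGet, bGet, List.foldl, PySem.Dict.contains_mk, PySem.Dict.get?_mk_cons, PySem.Dict.getD_eq_get?_getD]
  by_cases h10 : g = "XmM"
  · subst h10; simp [calculate_cat_group_count, calculate_cat_group_count_alt, group_mappings, flat_groups, aGet, bGet, List.foldl, PySem.Dict.contains_mk, PySem.Dict.get?_mk_cons, PySem.Dict.getD_eq_get?_getD]
  by_cases h11 : g = "XM"
  · subst h11; simp [calculate_cat_group_count, calculate_cat_group_count_alt, group_mappings, flat_groups, aGet, bGet, List.foldl, PySem.Dict.contains_mk, PySem.Dict.get?_mk_cons, PySem.Dict.getD_eq_get?_getD]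
  by_cases h12 : g = "XA"
  · subst h12; simp [calculate_cat_group_count, calculate_cat_group_count_alt, group_mappings, flat_groups, aGet, bGet, List.foldl, PySem.Dict.contains_mk, PySem.Dict.get?_mk_cons, PySem.Dict.getD_eq_get?_getD]
  by_cases h13 : g = "XS"
  · subst h13; simp [calculate_cat_group_count, calculate_cat_group_count_alt, group_mappings, flat_groups, aGet, bGet, List.foldl, PySem.Dict.contains_mk, PySem.Dict.get?_mk_cons, PySem.Dict.getD_eq_get?_getD]
  by_cases h14 : g = "NMC"
  · subst h14; simp [calculate_cat_group_count, calculate_cat_group_count_alt, group_mappings, flat_groups, aGet, bGet, List.foldl, PySem.Dict.contains_mk, PySem.Dict.get?_mk_cons, PySem.Dict.getD_eq_get?_getD]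
  by_cases h15 : g = "Vm"
  · subst h15; simp [calculate_cat_group_count, calculate_cat_group_count_alt, group_mappings, flat_groups, aGet, bGet, List.foldl, PySem.Dict.contains_mk, PySem.Dict.get?_mk_cons, PySem.Dict.getD_eq_get?_getD]
  by_cases h16 : g = "NL"
  · subst h16; simp [calculate_cat_group_count, calculate_cat_group_count_alt, group_mappings, flat_groups, aGet, bGet, List.foldl, PySem.Dict.contains_mk, PySem.Dict.get?_mk_cons, PySem.Dict.getD_eq_get?_getD]
  by_cases h17 : g = "NLv"
  · subst h17; simp [calculate_cat_group_count, calculate_cat_group_count_alt, group_mappings, flat_groups, aGet, bGet, List.foldl, PySem.Dict.contains_mk, PySem.Dict.get?_mk_cons, PySem.Dict.getD_eq_get?_getD]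
  · simp [calculate_cat_group_count, calculate_cat_group_count_alt, group_mappings, flat_groups,
      PySem.Dict.contains_mk, PySem.Dict.get?,
      Ne.symm h1, Ne.symm h2, Ne.symm h3, Ne.symm h4, Ne.symm h5, Ne.symm h6, Ne.symm h7,
      Ne.symm h8, Ne.symm h9, Ne.symm h10, Ne.symm h11, Ne.symm h12, Ne.symm h13, Ne.symm h14,
      Ne.symm h15, Ne.symm h16, Ne.symm h17]
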